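-- pv_equiv track=rewrite | github.com/DerThorsten/nifty | plmc/offsets.py | lifted_offsets
-- ===== SOURCE A (Python) =====
-- def lifted_offsets(r):
--     edge_set = set()
--     edge_list = []
--
--     for x0 in range(-r,r+1):
--         for x1 in range(-r,r+1):
--             offset = (x0, x1)
--             if offset not in edge_set and (-x0,-x1) not in edge_set:
--                 edge_set.add(offset)
--                 edge_list.append(offset)
--
--     return edge_list
-- ===== SOURCE B (Python) =====
-- def lifted_offsets(r):
--     # Directly emit the canonical (lexicographically-first) representative of each
--     # {offset, -offset} pair: all rows with negative x0, then the non-positive half of the central row.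
--     edge_list = []
--     for x0 in range(-r, 0):
--         for x1 in range(-r, r + 1):
--             edge_list.append((x0, x1))
--     for x1 in range(-r, 1):
--         edge_list.append((0, x1))
--     return edge_list
-- ===== Notes on version B (the rewrite author's own statement) =====
-- stated objective: simpler
-- what changed: Dropped the set and the symmetric-membership test: B directly emits the canonical (lexicographically-first) representative of each {offset,-offset} pair — all rows with negative first coordinate, then the non-positive half of the central row.
import Mathlib
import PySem

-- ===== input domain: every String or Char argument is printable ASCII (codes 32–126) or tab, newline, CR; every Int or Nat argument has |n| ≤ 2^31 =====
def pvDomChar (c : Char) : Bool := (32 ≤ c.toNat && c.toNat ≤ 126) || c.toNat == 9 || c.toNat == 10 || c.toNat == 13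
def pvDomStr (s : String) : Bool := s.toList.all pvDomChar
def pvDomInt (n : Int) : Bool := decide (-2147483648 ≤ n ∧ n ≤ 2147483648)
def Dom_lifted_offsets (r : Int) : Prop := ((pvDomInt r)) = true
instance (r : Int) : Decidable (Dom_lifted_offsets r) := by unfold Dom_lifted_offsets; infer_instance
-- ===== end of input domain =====

-- B drops A's set and symmetric-membership test and directly emits the canonical
-- representative of each {offset, -offset} pair (objective: simpler).


-- ===== PORT A =====
-- state: (edge_set, edge_list)
def stepA (x0 : Int) (st : PySem.Set (Int × Int) × List (Int × Int)) (x1 : Int) :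
    PySem.Set (Int × Int) × List (Int × Int) :=
  -- offset = (x0, x1); if offset not in edge_set and (-x0,-x1) not in edge_set
  if PySem.Set.contains st.1 (x0, x1) = false ∧ PySem.Set.contains st.1 (-x0, -x1) = false then
    (PySem.Set.add st.1 (x0, x1), st.2 ++ [(x0, x1)])
  else st

-- inner loop: for x1 in range(-r, r+1)
def innerA (r x0 : Int) (st : PySem.Set (Int × Int) × List (Int × Int)) :
    PySem.Set (Int × Int) × List (Int × Int) :=
  (PySem.List.pyRange (-r) (r + 1) 1).foldl (stepA x0) st

def lifted_offsets (r : Int) : List (Int × Int) :=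
  ((PySem.List.pyRange (-r) (r + 1) 1).foldl (fun st x0 => innerA r x0 st)
    ((PySem.Set.empty : PySem.Set (Int × Int)), ([] : List (Int × Int)))).2

-- ===== PORT B =====
def lifted_offsets_alt (r : Int) : List (Int × Int) :=
  let l1 := (PySem.List.pyRange (-r) 0 1).foldl
    (fun acc x0 =>
      (PySem.List.pyRange (-r) (r + 1) 1).foldl (fun acc x1 => acc ++ [(x0, x1)]) acc) []
  (PySem.List.pyRange (-r) 1 1).foldl (fun acc x1 => acc ++ [(0, x1)]) l1

-- ===== PRECONDITION & SPEC =====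
def Spec_lifted_offsets (r : Int) (out : List (Int × Int)) : Prop := out = lifted_offsets_alt r
instance (r : Int) (out : List (Int × Int)) : Decidable (Spec_lifted_offsets r out) := by unfold Spec_lifted_offsets; infer_instance

-- ===== CLAIM (what is proved, stated in full; the proofs are below) =====
def Claim_equal_lifted_offsets : Prop := ∀ (r : Int), Dom_lifted_offsets r → Spec_lifted_offsets r (lifted_offsets r)

-- ===== LEMMAS AND PROOFS =====

-- a row's worth of emitted offsets
def rowOf (x0 : Int) (xs : List Int) : List (Int × Int) := xs.map (fun x1 => (x0, x1))

-- If no element of the row (nor its negation) is already in the set, the whole row is emitted,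
-- into both the set and the list.
theorem inner_emit (x0 : Int) (xs : List Int) :
    ∀ (S : PySem.Set (Int × Int)) (L : List (Int × Int)),
    xs.Nodup →
    (∀ x ∈ xs, (x0, x) ∉ S) →
    (∀ x ∈ xs, (-x0, -x) ∉ S) →
    xs.Pairwise (fun a b => ¬(x0 = -x0 ∧ a = -b)) →
    xs.foldl (stepA x0) (S, L) = (S ++ rowOf x0 xs, L ++ rowOf x0 xs) := by
  induction xs with
  | nil => intro S L _ _ _ _; simp [rowOf]
  | cons a t ih =>
    intro S L hnd h1 h2 hp
    have ha1 : (x0, a) ∉ S := h1 a (by simp)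
    have ha2 : (-x0, -a) ∉ S := h2 a (by simp)
    have hstep : stepA x0 (S, L) a = (S ++ [(x0, a)], L ++ [(x0, a)]) := by
      simp [stepA, PySem.Set.contains, ha1, ha2, PySem.Set.add]
    rw [List.foldl_cons, hstep,
      ih (S ++ [(x0, a)]) (L ++ [(x0, a)])
        (List.Nodup.of_cons hnd)
        (by
          intro x hx
          simp only [List.mem_append, List.mem_singleton]
          rintro (h | h)
          · exact h1 x (by simp [hx]) h
          · have : x ≠ a := fun he => (List.nodup_cons.mp hnd).1 (he ▸ hx)
            exact this (by simpa using congrArg Prod.snd h))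
        (by
          intro x hx
          simp only [List.mem_append, List.mem_singleton]
          rintro (h | h)
          · exact h2 x (by simp [hx]) h
          · have hpa := (List.pairwise_cons.mp hp).1 x hx
            have h1' : -x0 = x0 := congrArg Prod.fst h
            have h2' : -x = a := congrArg Prod.snd h
            exact hpa ⟨h1'.symm, by omega⟩)
        ((List.pairwise_cons.mp hp).2)]
    simp [rowOf]

-- If every element's negation is already in the set, the row is skipped entirely.
theorem inner_skip (x0 : Int) (xs : List Int) :
    ∀ (S : PySem.Set (Int × Int)) (L : List (Int × Int)),
    (∀ x ∈ xs, (-x0, -x) ∈ S) →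
    xs.foldl (stepA x0) (S, L) = (S, L) := by
  induction xs with
  | nil => intro S L _; rfl
  | cons a t ih =>
    intro S L h
    have : stepA x0 (S, L) a = (S, L) := by
      simp [stepA, PySem.Set.contains, h a (by simp)]
    rw [List.foldl_cons, this, ih S L (fun x hx => h x (by simp [hx]))]

-- All strictly negative rows are emitted in full.
theorem neg_rows (r : Int) (xs : List Int) :
    ∀ (S : PySem.Set (Int × Int)) (L : List (Int × Int)),
    xs.Pairwise (· < ·) →
    (∀ x ∈ xs, x < 0) →
    (∀ p ∈ S, ∀ x ∈ xs, p.1 < x) →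
    xs.foldl (fun st x0 => innerA r x0 st) (S, L) =
      (S ++ xs.flatMap (fun x0 => rowOf x0 (PySem.List.pyRange (-r) (r + 1) 1)),
       L ++ xs.flatMap (fun x0 => rowOf x0 (PySem.List.pyRange (-r) (r + 1) 1))) := by
  induction xs with
  | nil => intro S L _ _ _; simp
  | cons a t ih =>
    intro S L hp hneg hS
    have ha : a < 0 := hneg a (by simp)
    have hrow : innerA r a (S, L) =
        (S ++ rowOf a (PySem.List.pyRange (-r) (r + 1) 1),
         L ++ rowOf a (PySem.List.pyRange (-r) (r + 1) 1)) := by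
      apply inner_emit
      · exact PySem.List.nodup_pyRange_one _ _
      · intro x _ hmem
        exact absurd rfl (Int.ne_of_lt (hS _ hmem a (by simp)))
      · intro x _ hmem
        have := hS _ hmem a (by simp)
        simp only at this
        omega
      · exact List.Pairwise.imp (fun _ h => by omega) (PySem.List.pairwise_lt_pyRange_one (-r) (r + 1))
    rw [List.foldl_cons, hrow,
      ih _ _ (List.Pairwise.of_cons hp) (fun x hx => hneg x (by simp [hx]))
        (by
          intro p hp' x hx
          rcases List.mem_append.mp hp' with h | h
          · exact lt_trans (hS p h a (by simp)) ((List.pairwise_cons.mp hp).1 x hx)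
          · rcases List.mem_map.mp h with ⟨x1, _, rfl⟩
            exact (List.pairwise_cons.mp hp).1 x hx)]
    simp [List.flatMap_cons]

-- All strictly positive rows are skipped.
theorem pos_rows (r : Int) (xs : List Int) :
    ∀ (S : PySem.Set (Int × Int)) (L : List (Int × Int)),
    (∀ x0 ∈ xs, ∀ x1 ∈ PySem.List.pyRange (-r) (r + 1) 1, (-x0, -x1) ∈ S) →
    xs.foldl (fun st x0 => innerA r x0 st) (S, L) = (S, L) := by
  induction xs with
  | nil => intro S L _; rfl
  | cons a t ih =>
    intro S L h
    have : innerA r a (S, L) = (S, L) := inner_skip a _ S L (h a (by simp))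
    rw [List.foldl_cons, this, ih S L (fun x hx => h x (by simp [hx]))]

theorem alt_closed (r : Int) :
    lifted_offsets_alt r =
      (PySem.List.pyRange (-r) 0 1).flatMap
        (fun x0 => rowOf x0 (PySem.List.pyRange (-r) (r + 1) 1)) ++
      rowOf 0 (PySem.List.pyRange (-r) 1 1) := by
  unfold lifted_offsets_alt
  rw [PySem.List.foldl_append_singleton_eq_map]
  have : ∀ (acc : List (Int × Int)),
      (PySem.List.pyRange (-r) 0 1).foldl
        (fun acc x0 =>
          (PySem.List.pyRange (-r) (r + 1) 1).foldl (fun acc x1 => acc ++ [(x0, x1)]) acc) acc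
      = acc ++ (PySem.List.pyRange (-r) 0 1).flatMap
          (fun x0 => rowOf x0 (PySem.List.pyRange (-r) (r + 1) 1)) := by
    intro acc
    have hbody : (fun (acc : List (Int × Int)) (x0 : Int) =>
        (PySem.List.pyRange (-r) (r + 1) 1).foldl (fun acc x1 => acc ++ [(x0, x1)]) acc)
        = fun acc x0 => acc ++ rowOf x0 (PySem.List.pyRange (-r) (r + 1) 1) := by
      funext acc x0
      exact PySem.List.foldl_append_singleton_eq_map _ _ _
    rw [hbody, PySem.List.foldl_append_eq_flatMap]
  rw [this]
  simp [rowOf]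

-- ===== VERDICT (by name: the statement is the Claim_ definition above) =====
theorem lifted_offsets_spec : Claim_equal_lifted_offsets := by
  intro r _
  unfold Spec_lifted_offsets
  by_cases hr : 0 ≤ r
  · -- r ≥ 0: split the outer range into negative rows, row 0, positive rows
    unfold lifted_offsets
    rw [PySem.List.pyRange_one_append (-r) 0 (r + 1) (by omega) (by omega),
        PySem.List.pyRange_one_cons (show (0:Int) < r + 1 by omega)]
    rw [List.foldl_append]
    rw [neg_rows r _ _ _ (PySem.List.pairwise_lt_pyRange_one _ _)
        (fun x hx => ((PySem.List.mem_pyRange_one).mp hx).2)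
        (by intro p hp; simp [PySem.Set.empty] at hp)]
    simp only [PySem.Set.empty, List.nil_append]
    set J := (PySem.List.pyRange (-r) 0 1).flatMap
        (fun x0 => rowOf x0 (PySem.List.pyRange (-r) (r + 1) 1)) with hJ
    have hJmem : ∀ p ∈ J, -r ≤ p.1 ∧ p.1 < 0 ∧ -r ≤ p.2 ∧ p.2 < r + 1 := by
      intro p hp
      rw [hJ] at hp
      rcases List.mem_flatMap.mp hp with ⟨x0, hx0, hpr⟩
      rcases List.mem_map.mp hpr with ⟨x1, hx1, rfl⟩
      have h0 := (PySem.List.mem_pyRange_one).mp hx0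
      have h1 := (PySem.List.mem_pyRange_one).mp hx1
      exact ⟨h0.1, h0.2, h1.1, h1.2⟩
    rw [List.foldl_cons]
    -- row 0: emit the non-positive half, skip the positive half
    have hrow0 : innerA r 0 (J, J)
        = (J ++ rowOf 0 (PySem.List.pyRange (-r) 1 1),
           J ++ rowOf 0 (PySem.List.pyRange (-r) 1 1)) := by
      unfold innerA
      rw [PySem.List.pyRange_one_append (-r) 1 (r + 1) (by omega) (by omega), List.foldl_append]
      have hemit : (PySem.List.pyRange (-r) 1 1).foldl (stepA 0) (J, J)
          = (J ++ rowOf 0 (PySem.List.pyRange (-r) 1 1),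
             J ++ rowOf 0 (PySem.List.pyRange (-r) 1 1)) := by
        apply inner_emit 0 (PySem.List.pyRange (-r) 1 1) J J
          (PySem.List.nodup_pyRange_one _ _)
        · intro x _ hmem
          have := hJmem _ hmem
          omega
        · intro x _ hmem
          have := hJmem _ hmem
          simp only [neg_zero] at this
          omega
        · refine List.Pairwise.imp_of_mem ?_ (PySem.List.pairwise_lt_pyRange_one (-r) 1)
          intro a b ha hb hab
          have hb' := (PySem.List.mem_pyRange_one).mp hb
          rintro ⟨-, rfl⟩
          omega
      rw [hemit]
      apply inner_skip
      intro x hx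
      have hx' := (PySem.List.mem_pyRange_one).mp hx
      simp only [neg_zero, List.mem_append]
      right
      apply List.mem_map.mpr
      exact ⟨-x, (PySem.List.mem_pyRange_one).mpr (by omega), rfl⟩
    rw [hrow0]
    rw [pos_rows r _ _ _ (by
      intro x0 hx0 x1 hx1
      have h0 := (PySem.List.mem_pyRange_one).mp hx0
      have h1 := (PySem.List.mem_pyRange_one).mp hx1
      apply List.mem_append.mpr
      left
      rw [hJ]
      apply List.mem_flatMap.mpr
      refine ⟨-x0, (PySem.List.mem_pyRange_one).mpr (by omega), ?_⟩
      exact List.mem_map.mpr ⟨-x1, (PySem.List.mem_pyRange_one).mpr (by omega), rfl⟩)]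
    rw [alt_closed, hJ]
  · -- r < 0: all ranges are empty, both sides are []
    have hr' : r < 0 := by omega
    unfold lifted_offsets
    rw [alt_closed,
        PySem.List.pyRange_one_eq_nil (show r + 1 ≤ -r by omega),
        PySem.List.pyRange_one_eq_nil (show (1:Int) ≤ -r by omega),
        PySem.List.pyRange_one_eq_nil (show (0:Int) ≤ -r by omega)]
    simp [rowOf]
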